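-- pv_equiv track=rewrite | github.com/fclark28/wordle-solver | wordle/operations.py | __containsAllKnownLetters
-- ===== SOURCE A (Python) =====
-- def __containsAllKnownLetters(word, knownMap):
--   wordMap = __createLetterMap(word)
--
--   for k in knownMap:
--     if not k in wordMap:
--       # Our word doesn't contain a letter we know we need
--       return False
--     elif wordMap[k] < knownMap[k]:
--       # The word has the letter, but not enough of them
--       return False
--
--   return True
--
-- def __createLetterMap(word):
--   lettermap = {}
--   for i in range (0, len(word)):
--     letter = word[i]
--     if letter in lettermap:
--       lettermap[letter] += 1
--     else:
--       lettermap[letter] = 1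
--   return lettermap
-- ===== SOURCE B (Python) =====
-- def __containsAllKnownLetters(word, knownMap):
--   # Run-length encode the word's letters after sorting them, then answer each
--   # requirement by scanning the (short) run table: a letter's run length is its count.
--   runs = []
--   for c in sorted(word):
--     if runs and runs[-1][0] == c:
--       runs[-1] = (c, runs[-1][1] + 1)
--     else:
--       runs.append((c, 1))
--   for k in knownMap:
--     have = 0
--     for ch, cnt in runs:
--       if ch == k:
--         have = cnt
--         break
--     if have == 0 or have < knownMap[k]:
--       return False
--   return True
-- ===== Notes on version B (the rewrite author's own statement) =====
-- stated objective: alternative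
-- what changed: Replaces the hash-map letter counter with a sort-then-scan design: the word's letters are sorted and run-length encoded, and each required letter is answered by scanning the run table (a run's length is that letter's count; absence = no run).
import Mathlib
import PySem

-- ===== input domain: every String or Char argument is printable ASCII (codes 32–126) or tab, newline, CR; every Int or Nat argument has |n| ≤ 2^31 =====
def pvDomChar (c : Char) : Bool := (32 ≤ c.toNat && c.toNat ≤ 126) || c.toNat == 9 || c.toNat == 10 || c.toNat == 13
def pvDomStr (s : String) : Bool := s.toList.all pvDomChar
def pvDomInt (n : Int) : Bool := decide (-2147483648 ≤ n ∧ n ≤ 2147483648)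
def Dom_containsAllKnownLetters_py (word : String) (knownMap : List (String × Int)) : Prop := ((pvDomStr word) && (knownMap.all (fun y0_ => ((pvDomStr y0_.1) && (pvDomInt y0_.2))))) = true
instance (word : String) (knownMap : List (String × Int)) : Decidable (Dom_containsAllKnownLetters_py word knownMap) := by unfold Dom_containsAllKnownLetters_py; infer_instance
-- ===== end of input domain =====

-- B replaces A's hash-map letter counter with sort + run-length encoding + a scan of the
-- run table per required letter (same results, a different data structure and traversal).


-- ===== PORT A =====
-- __createLetterMap: Python's word[i] is a 1-character string, ported as String.ofList [ch]
-- (Str.pyGet? is always `some` for i in range(0, len(word)); the ' ' default is unreachable).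
def createLetterMap_py (word : String) : PySem.Dict String Int :=
  (PySem.List.pyRange 0 (PySem.Str.len word) 1).foldl
    (fun lettermap i =>
      let letter : String := String.ofList [(PySem.Str.pyGet? word i).getD ' ']
      if lettermap.contains letter then lettermap.modify letter 0 (· + 1)
      else lettermap.insert letter 1)
    PySem.Dict.empty

-- the `for k in knownMap:` loop of __containsAllKnownLetters
def containsAllKnownLettersGo (wordMap km : PySem.Dict String Int) : List (String × Int) → Bool
  | [] => true
  | (k, _) :: rest =>
    if !(wordMap.contains k) then false
    else if wordMap.getD k 0 < km.getD k 0 then false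
    else containsAllKnownLettersGo wordMap km rest

def containsAllKnownLetters_py (word : String) (knownMap : List (String × Int)) : Bool :=
  let wordMap := createLetterMap_py word
  let km := PySem.Dict.ofList knownMap   -- knownMap is a Python dict
  containsAllKnownLettersGo wordMap km km.items

-- ===== PORT B =====
-- the RLE-building loop over sorted(word) (Python iterates a str as 1-character strings)
def buildRuns_alt (l : List String) : List (String × Int) :=
  l.foldl (fun runs c =>
    match runs.getLast? with
    | some (ch, n) => if ch == c then runs.dropLast ++ [(c, n + 1)] else runs ++ [(c, 1)]
    | none => runs ++ [(c, 1)]) []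

-- the inner `for ch, cnt in runs: … break` scan (first match, else the initial have = 0)
def lookupRun_alt : List (String × Int) → String → Int
  | [], _ => 0
  | (ch, cnt) :: rest, k => if ch == k then cnt else lookupRun_alt rest k

-- the `for k in knownMap:` loop
def checkRuns_alt (runs : List (String × Int)) (km : PySem.Dict String Int) : List (String × Int) → Bool
  | [] => true
  | (k, _) :: rest =>
    let hv := lookupRun_alt runs k
    if hv == 0 || decide (hv < km.getD k 0) then false
    else checkRuns_alt runs km rest

def containsAllKnownLetters_py_alt (word : String) (knownMap : List (String × Int)) : Bool :=
  let runs := buildRuns_alt (PySem.List.sorted (word.toList.map (fun c => String.ofList [c])) (fun x => x) false)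
  let km := PySem.Dict.ofList knownMap
  checkRuns_alt runs km km.items

-- ===== PRECONDITION & SPEC =====
def Spec_containsAllKnownLetters_py (word : String) (knownMap : List (String × Int)) (out : Bool) : Prop := out = containsAllKnownLetters_py_alt word knownMap
instance (word : String) (knownMap : List (String × Int)) (out : Bool) : Decidable (Spec_containsAllKnownLetters_py word knownMap out) := by unfold Spec_containsAllKnownLetters_py; infer_instance

-- ===== CLAIM (what is proved, stated in full; the proofs are below) =====
def Claim_equal_containsAllKnownLetters_py : Prop := ∀ (word : String) (knownMap : List (String × Int)), Dom_containsAllKnownLetters_py word knownMap → Spec_containsAllKnownLetters_py word knownMap (containsAllKnownLetters_py word knownMap)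

-- ===== LEMMAS AND PROOFS =====

theorem pvStepCollapse (lm : PySem.Dict String Int) (x : String) :
    (if lm.contains x then lm.modify x 0 (· + 1) else lm.insert x 1) = lm.modify x 0 (· + 1) := by
  by_cases hc : lm.contains x
  · simp [hc]
  · have hg : lm.get? x = none :=
      (PySem.Dict.get?_eq_none_iff_contains _ _).2 (by simpa using hc)
    simp [hc, PySem.Dict.modify, PySem.Dict.getD, hg]

-- the letter map A builds IS Counter(list(word))
theorem pvLetterMapEqCounter (word : String) :
    createLetterMap_py word = PySem.Dict.counter (word.toList.map (fun c => String.ofList [c])) := by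
  unfold createLetterMap_py
  have hstep : (fun (lm : PySem.Dict String Int) (i : Int) =>
      let letter : String := String.ofList [(PySem.Str.pyGet? word i).getD ' ']
      if lm.contains letter then lm.modify letter 0 (· + 1)
      else lm.insert letter 1)
      = fun lm i => PySem.Dict.modify lm (String.ofList [(PySem.Str.pyGet? word i).getD ' ']) 0 (· + 1) := by
    funext lm i
    exact pvStepCollapse lm _
  rw [hstep]
  have hmap : (PySem.List.pyRange 0 (PySem.Str.len word) 1).map
      (fun i => String.ofList [(PySem.Str.pyGet? word i).getD ' '])
      = word.toList.map (fun c => String.ofList [c]) := by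
    rw [PySem.Str.len_eq, PySem.List.pyRange_zero_natCast, List.map_map]
    apply List.ext_getElem (by simp)
    intro i h1 h2
    have hi : i < word.toList.length := by simpa using h2
    simp [List.getElem?_eq_getElem hi]
  calc (PySem.List.pyRange 0 (PySem.Str.len word) 1).foldl
        (fun lm i => PySem.Dict.modify lm (String.ofList [(PySem.Str.pyGet? word i).getD ' ']) 0 (· + 1))
        PySem.Dict.empty
      = ((PySem.List.pyRange 0 (PySem.Str.len word) 1).map
          (fun i => String.ofList [(PySem.Str.pyGet? word i).getD ' '])).foldl
          (fun lm x => PySem.Dict.modify lm x 0 (· + 1)) PySem.Dict.empty := by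
        rw [List.foldl_map]
    _ = PySem.Dict.counter (word.toList.map (fun c => String.ofList [c])) := by
        rw [hmap, PySem.Dict.counter_eq_foldl]

-- first-match lookup splits over append
theorem pvLookupAppend (xs ys : List (String × Int)) (k : String) :
    lookupRun_alt (xs ++ ys) k
      = if k ∈ xs.map Prod.fst then lookupRun_alt xs k else lookupRun_alt ys k := by
  induction xs with
  | nil => simp
  | cons hd tl ih =>
    obtain ⟨c, n⟩ := hd
    by_cases hc : c = k
    · subst hc; simp [lookupRun_alt]
    · simp only [List.cons_append, lookupRun_alt, beq_iff_eq, if_neg hc, ih, List.map_cons]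
      by_cases hk : k ∈ tl.map Prod.fst <;> simp [hk, Ne.symm hc]

-- a found lookup returns some entry's count
theorem pvLookupMem (xs : List (String × Int)) (k : String) (h : k ∈ xs.map Prod.fst) :
    ∃ p ∈ xs, p.1 = k ∧ lookupRun_alt xs k = p.2 := by
  induction xs with
  | nil => simp at h
  | cons hd tl ih =>
    obtain ⟨c, n⟩ := hd
    by_cases hc : c = k
    · subst hc; exact ⟨(c, n), by simp, rfl, by simp [lookupRun_alt]⟩
    · rw [List.map_cons] at h
      have h' : k ∈ tl.map Prod.fst := by
        rcases List.mem_cons.mp h with h1 | h1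
        · exact absurd h1.symm hc
        · exact h1
      obtain ⟨p, hp, hpk, hpl⟩ := ih h'
      exact ⟨p, by simp [hp], hpk, by simp [lookupRun_alt, hc, hpl]⟩

-- buildRuns on a sorted list: strictly increasing run letters, positive lengths,
-- and lookup = the letter's count (0 when absent)
theorem pvRunsSpec (l : List String) (hs : l.Pairwise (· ≤ ·)) :
    ((buildRuns_alt l).map Prod.fst).Pairwise (· < ·) ∧
    (∀ p ∈ buildRuns_alt l, 1 ≤ p.2) ∧
    (∀ k, lookupRun_alt (buildRuns_alt l) k = if k ∈ l then (l.count k : Int) else 0) := by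
  induction l using List.reverseRecOn with
  | nil => refine ⟨by simp [buildRuns_alt], by simp [buildRuns_alt], ?_⟩
           intro k; simp [buildRuns_alt, lookupRun_alt]
  | append_singleton l c ih =>
    rw [List.pairwise_append] at hs
    obtain ⟨hsl, -, hlc'⟩ := hs
    have hlc : ∀ x ∈ l, x ≤ c := fun x hx => hlc' x hx c (by simp)
    obtain ⟨IH1, IH2, IH3⟩ := ih hsl
    have hstep : buildRuns_alt (l ++ [c])
        = (match (buildRuns_alt l).getLast? with
           | some (ch, n) => if ch == c then (buildRuns_alt l).dropLast ++ [(c, n + 1)]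
                             else buildRuns_alt l ++ [(c, 1)]
           | none => buildRuns_alt l ++ [(c, 1)]) := by
      unfold buildRuns_alt
      rw [List.foldl_append]
      rfl
    -- membership of run letters in l
    have hcharmem : ∀ k, k ∈ (buildRuns_alt l).map Prod.fst → k ∈ l := by
      intro k hk
      obtain ⟨p, hp, hpk, hpl⟩ := pvLookupMem _ k hk
      have h1 := IH2 p hp
      by_contra hkl
      have := IH3 k
      rw [if_neg hkl] at this
      rw [hpl] at this
      omega
    rcases (buildRuns_alt l).eq_nil_or_concat' with hnil | ⟨rs, ⟨d, m⟩, hdec⟩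
    · -- no runs yet: l must be empty
      have hl : l = [] := by
        by_contra hln
        obtain ⟨x, hx⟩ := List.exists_mem_of_ne_nil l hln
        have := IH3 x
        rw [if_pos hx, hnil] at this
        have hcp : 0 < l.count x := List.count_pos_iff.mpr hx
        simp [lookupRun_alt] at this
        omega
      subst hl
      rw [hstep]
      simp only [buildRuns_alt, List.foldl_nil, List.getLast?_nil, List.nil_append]
      refine ⟨by simp, by simp, ?_⟩
      intro k
      by_cases hk : c = k
      · subst hk; simp [lookupRun_alt]
      · simp [lookupRun_alt, hk, Ne.symm hk]
    · -- there is a last run (d, m)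
      rw [hdec] at hstep IH1 IH2 IH3 hcharmem
      have hglast : (rs ++ [(d, m)]).getLast? = some (d, m) := by
        simp
      rw [hglast] at hstep
      have hm1 : (1 : Int) ≤ m := IH2 (d, m) (by simp)
      have hrsfst : ∀ x ∈ rs.map Prod.fst, x < d := by
        intro x hx
        rw [List.map_append] at IH1
        rw [List.pairwise_append] at IH1
        exact IH1.2.2 x hx d (by simp)
      have hdrs : d ∉ rs.map Prod.fst := fun h => absurd (hrsfst d h) (lt_irrefl d)
      have hlookd : lookupRun_alt (rs ++ [(d, m)]) d = m := by
        rw [pvLookupAppend, if_neg hdrs]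
        simp [lookupRun_alt]
      have hdl : d ∈ l ∧ (l.count d : Int) = m := by
        have := IH3 d
        rw [hlookd] at this
        by_cases hdm : d ∈ l
        · exact ⟨hdm, (by rw [if_pos hdm] at this; omega)⟩
        · rw [if_neg hdm] at this; omega
      -- lookup of an absent letter is 0; letters of l all appear as run letters
      have hlmem : ∀ k ∈ l, k ∈ (rs ++ [(d, m)]).map Prod.fst := by
        intro k hk
        by_contra hkm
        have h0 : lookupRun_alt (rs ++ [(d, m)]) k = 0 := by
          rw [pvLookupAppend, if_neg (by
            intro hc; exact hkm (by simp [hc]))]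
          have hkd : ¬ d = k := fun h => hkm (by simp [h])
          simp [lookupRun_alt, hkd]
        have := IH3 k
        rw [if_pos hk, h0] at this
        have hcp : 0 < l.count k := List.count_pos_iff.mpr hk
        omega
      by_cases hdc : d = c
      · -- bump the last run
        subst hdc
        rw [hstep]
        simp only [beq_self_eq_true, if_true, List.dropLast_concat]
        refine ⟨?_, ?_, ?_⟩
        · simpa using IH1
        · intro p hp
          rcases (by simpa using hp : p ∈ rs ∨ p = (d, m + 1)) with h1 | h1
          · exact IH2 p (by simp [h1])
          · subst h1; simp; omega
        · intro k
          rw [pvLookupAppend]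
          by_cases hkr : k ∈ rs.map Prod.fst
          · rw [if_pos hkr]
            have hkd : ¬ k = d := by
              intro h; subst h; exact absurd (hrsfst k hkr) (lt_irrefl k)
            have hkd' : ¬ d = k := fun h => hkd h.symm
            have hkl : k ∈ l := hcharmem k (by simp [hkr])
            have := IH3 k
            rw [pvLookupAppend, if_pos hkr, if_pos hkl] at this
            rw [this, if_pos (by simp [hkl])]
            have : (l ++ [d]).count k = l.count k := by
              rw [List.count_append]
              simp [hkd']
            rw [this]
          · rw [if_neg hkr]
            by_cases hkd : d = k
            · subst hkd
              simp only [lookupRun_alt, beq_self_eq_true, if_true]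
              rw [if_pos (by simp)]
              rw [List.count_append]
              simp
              omega
            · simp only [lookupRun_alt, beq_iff_eq, if_neg hkd]
              have hkl : k ∉ l := fun hk => by
                have hmm := hlmem k hk
                rw [List.map_append] at hmm
                rcases List.mem_append.mp hmm with h1 | h1
                · exact hkr h1
                · exact hkd (by simpa using h1 : k = d).symm
              rw [if_neg (by
                intro h
                rcases (by simpa using h : k ∈ l ∨ k = d) with h1 | h1
                · exact hkl h1
                · exact hkd h1.symm)]
      · -- start a new run
        have hcl : c ∉ l := by
          intro hcl
          have hcchars := hlmem c hcl
          rw [List.map_append] at hcchars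
          rcases List.mem_append.mp hcchars with h1 | h1
          · have hcd : c < d := hrsfst c h1
            have hdc' : d ≤ c := hlc d hdl.1
            exact absurd (lt_of_lt_of_le hcd hdc') (lt_irrefl c)
          · exact hdc (by simpa using h1 : c = d).symm
        rw [hstep]
        have hbne : ((d : String) == c) = false := by simp [hdc]
        simp only [hbne, Bool.false_eq_true, if_false]
        refine ⟨?_, ?_, ?_⟩
        · rw [List.map_append, List.pairwise_append]
          refine ⟨IH1, by simp, ?_⟩
          intro x hx y hy
          have hxl : x ∈ l := hcharmem x hx
          have hyc : y = c := by simpa using hy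
          subst hyc
          exact lt_of_le_of_ne (hlc x hxl) (fun h => hcl (h ▸ hxl))
        · intro p hp
          rcases (by simpa using hp : p ∈ rs ∨ p = (d, m) ∨ p = (c, 1)) with h1 | h1 | h1
          · exact IH2 p (by simp [h1])
          · exact IH2 p (by simp [h1])
          · subst h1; simp
        · intro k
          rw [pvLookupAppend]
          by_cases hkm : k ∈ (rs ++ [(d, m)]).map Prod.fst
          · rw [if_pos hkm]
            have hkl : k ∈ l := hcharmem k hkm
            have hkc : ¬ k = c := fun h => hcl (h ▸ hkl)
            have := IH3 k
            rw [if_pos hkl] at this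
            have hkc' : ¬ c = k := fun h => hkc h.symm
            rw [this, if_pos (by simp [hkl]), List.count_append]
            simp [hkc']
          · rw [if_neg hkm]
            have hkl : k ∉ l := fun hk => hkm (hlmem k hk)
            by_cases hkc : c = k
            · subst hkc
              simp only [lookupRun_alt, beq_self_eq_true, if_true]
              rw [if_pos (by simp), List.count_append]
              simp [List.count_eq_zero_of_not_mem hkl]
            · simp only [lookupRun_alt, beq_iff_eq, if_neg hkc]
              rw [if_neg (by
                intro h
                rcases (by simpa using h : k ∈ l ∨ k = c) with h1 | h1
                · exact hkl h1
                · exact hkc h1.symm)]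

-- B's per-letter lookup over the runs of sorted(word) = membership/count in the letter list
theorem pvLookupSorted (l₀ : List String) (k : String) :
    lookupRun_alt (buildRuns_alt (PySem.List.sorted l₀ (fun x => x) false)) k
      = if k ∈ l₀ then (l₀.count k : Int) else 0 := by
  have hperm : (PySem.List.sorted l₀ (fun x => x) false).Perm l₀ := PySem.List.sorted_perm l₀ _ _
  have hs : (PySem.List.sorted l₀ (fun x => x) false).Pairwise (· ≤ ·) := by
    have := PySem.List.sorted_pairwise l₀ (fun x => x)
    simpa using this
  obtain ⟨-, -, h3⟩ := pvRunsSpec _ hs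
  rw [h3 k]
  by_cases hk : k ∈ l₀
  · rw [if_pos (hperm.mem_iff.mpr hk), if_pos hk, hperm.count_eq]
  · rw [if_neg (fun h => hk (hperm.mem_iff.mp h)), if_neg hk]

-- the two key loops agree
theorem pvGoEqCheck (word : String) (km : PySem.Dict String Int) (items : List (String × Int)) :
    containsAllKnownLettersGo (createLetterMap_py word) km items
      = checkRuns_alt
          (buildRuns_alt (PySem.List.sorted (word.toList.map (fun c => String.ofList [c])) (fun x => x) false))
          km items := by
  induction items with
  | nil => rfl
  | cons hd tl ih =>
    obtain ⟨k, v⟩ := hd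
    simp only [containsAllKnownLettersGo, checkRuns_alt]
    rw [pvLetterMapEqCounter, pvLookupSorted]
    set l₀ := word.toList.map (fun c => String.ofList [c]) with hl₀
    by_cases hk : k ∈ l₀
    · have hcont : (PySem.Dict.counter l₀).contains k = true := by
        rw [PySem.Dict.contains_counter]; simpa using hk
      have hget : (PySem.Dict.counter l₀).getD k 0 = (l₀.count k : Int) := PySem.Dict.getD_counter l₀ k
      have hcp : 0 < l₀.count k := List.count_pos_iff.mpr hk
      rw [if_pos hk, hcont, hget]
      have hz : (((l₀.count k : Int)) == 0) = false := by
        simp; omega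
      rw [hz]
      simp only [Bool.not_true, Bool.false_eq_true, if_false, Bool.false_or]
      by_cases hlt : (l₀.count k : Int) < km.getD k 0
      · rw [if_pos hlt, if_pos (by simpa using hlt)]
      · rw [if_neg hlt, if_neg (by simpa using hlt)]
        rw [← pvLetterMapEqCounter, ih]
    · have hcont : (PySem.Dict.counter l₀).contains k = false := by
        rw [PySem.Dict.contains_counter]; simpa using hk
      rw [if_neg hk, hcont]
      simp

-- ===== VERDICT (by name: the statement is the Claim_ definition above) =====
theorem containsAllKnownLetters_py_spec : Claim_equal_containsAllKnownLetters_py := by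
  intro word knownMap _
  unfold Spec_containsAllKnownLetters_py containsAllKnownLetters_py containsAllKnownLetters_py_alt
  exact pvGoEqCheck word (PySem.Dict.ofList knownMap) (PySem.Dict.ofList knownMap).items
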